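-- pv_equiv track=rewrite | github.com/ShuvalovAnthony/ez_python | Danya/8/18974.py | check
-- ===== SOURCE A (Python) =====
-- from string import digits, ascii_uppercase
--
-- alph = digits + ascii_uppercase[:15]
--
-- def check(num: str):
--     nechet_count = 0
--     for nechet in alph[1::2]:
--         nechet_count += num.count(nechet)
--
--     ne_prev_5_cifr = 0
--     for digit in "012345":
--         ne_prev_5_cifr += num.count(digit)
--
--     return (
--         (nechet_count == 1) and
--         (ne_prev_5_cifr <= 2)
--     )
-- ===== SOURCE B (Python) =====
-- def check(num: str):
--     odd_set = set("13579BDFHJLN")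
--     low_set = set("012345")
--     nechet_count = 0
--     ne_prev_5_cifr = 0
--     for ch in num:
--         if ch in odd_set:
--             nechet_count += 1
--         if ch in low_set:
--             ne_prev_5_cifr += 1
--     return (nechet_count == 1) and (ne_prev_5_cifr <= 2)
-- ===== Notes on version B (the rewrite author's own statement) =====
-- stated objective: alternative
-- what changed: Single pass over the input with two precomputed membership sets, instead of 18 separate num.count scans (one per alphabet character); in CPython the C-level str.count keeps A competitive, so no speed is claimed.
import Mathlib
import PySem

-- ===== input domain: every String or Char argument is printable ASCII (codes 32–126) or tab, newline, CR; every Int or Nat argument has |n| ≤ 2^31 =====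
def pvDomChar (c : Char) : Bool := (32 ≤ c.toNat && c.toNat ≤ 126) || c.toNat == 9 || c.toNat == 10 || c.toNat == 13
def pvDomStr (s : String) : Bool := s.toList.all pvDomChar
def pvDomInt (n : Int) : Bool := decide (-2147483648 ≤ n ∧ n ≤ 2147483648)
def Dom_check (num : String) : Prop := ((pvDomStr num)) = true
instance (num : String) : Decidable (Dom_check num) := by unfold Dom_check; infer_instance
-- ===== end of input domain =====

-- B replaces A's 18 full scans of num (one .count per alphabet character) by one pass with two membership sets (alternative decomposition; no speed claimed).

-- ===== PORT A =====
-- string.digits and string.ascii_uppercase, as code-point lists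
def pyDigits : List Char := "0123456789".toList
def pyAsciiUppercase : List Char := "ABCDEFGHIJKLMNOPQRSTUVWXYZ".toList
-- alph = digits + ascii_uppercase[:15]
def alphChars : List Char := pyDigits ++ PySem.List.slice pyAsciiUppercase none (some 15)

def check (num : String) : Bool :=
  -- alph[1::2]; step 2 ≠ 0 so slice? is always some (the getD default is never used)
  let odds := (PySem.List.slice? alphChars (some 1) none 2).getD []
  let nechet_count : Int :=
    odds.foldl (fun acc c => acc + (PySem.Chars.count num.toList [c] : Int)) 0
  let ne_prev_5_cifr : Int :=
    ("012345".toList).foldl (fun acc c => acc + (PySem.Chars.count num.toList [c] : Int)) 0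
  (nechet_count == 1) && decide (ne_prev_5_cifr ≤ 2)

-- ===== PORT B =====
def oddSet : List Char := PySem.Set.ofList "13579BDFHJLN".toList
def lowSet : List Char := PySem.Set.ofList "012345".toList

def check_alt (num : String) : Bool :=
  let p := num.toList.foldl
    (fun (acc : Int × Int) ch =>
      (if oddSet.contains ch then acc.1 + 1 else acc.1,
       if lowSet.contains ch then acc.2 + 1 else acc.2)) (0, 0)
  (p.1 == 1) && decide (p.2 ≤ 2)

-- ===== PRECONDITION & SPEC =====
def Spec_check (num : String) (out : Bool) : Prop := out = check_alt num
instance (num : String) (out : Bool) : Decidable (Spec_check num out) := by unfold Spec_check; infer_instance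

-- ===== CLAIM (what is proved, stated in full; the proofs are below) =====
def Claim_equal_check : Prop := ∀ (num : String), Dom_check num → Spec_check num (check num)

-- ===== LEMMAS AND PROOFS =====

-- single-character substring count is element count
theorem chars_count_go_singleton (c : Char) (s : List Char) (acc fuel : Nat)
    (h : s.length ≤ fuel) :
    PySem.Chars.count.go [c] fuel s acc = acc + s.count c := by
  induction s generalizing acc fuel with
  | nil => cases fuel <;> simp [PySem.Chars.count.go]
  | cons x t ih =>
    cases fuel with
    | zero => simp at h
    | succ f =>
      simp only [List.length_cons, Nat.succ_le_succ_iff] at h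
      by_cases hx : c = x
      · subst hx
        simp [PySem.Chars.count.go, List.isPrefixOf, ih _ _ h]
        omega
      · simp [PySem.Chars.count.go, List.isPrefixOf, Ne.symm hx, hx, ih _ _ h]

theorem chars_count_singleton (s : List Char) (c : Char) :
    PySem.Chars.count s [c] = s.count c := by
  simp [PySem.Chars.count, chars_count_go_singleton c s 0 s.length le_rfl]

-- Σ_{c ∈ L} (indicator x = c) over a duplicate-free L is the membership indicator
theorem sum_indicator_nodup (L : List Char) (x : Char) (hL : L.Nodup) :
    (L.map (fun c => if x = c then (1 : Int) else 0)).sum =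
      if L.contains x then 1 else 0 := by
  induction L with
  | nil => simp
  | cons y t ih =>
    simp only [List.nodup_cons] at hL
    by_cases hxy : x = y
    · subst hxy
      simp [ih hL.2, hL.1]
    · simp [List.map_cons, hxy, ih hL.2]

-- the A-side sum of per-character counts is a single countP
theorem sum_counts_eq_countP (L : List Char) (hL : L.Nodup) (s : List Char) :
    (L.map (fun c => (s.count c : Int))).sum =
      (s.countP (fun ch => L.contains ch) : Int) := by
  induction s with
  | nil => simp
  | cons x t ih =>
    have hcnt : ∀ c : Char, ((x :: t).count c : Int) =
        (t.count c : Int) + (if x = c then 1 else 0) := by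
      intro c
      by_cases h : x = c
      · subst h; simp
      · simp [h]
    calc (L.map (fun c => ((x :: t).count c : Int))).sum
        = (L.map (fun c => (t.count c : Int) + (if x = c then 1 else 0))).sum := by
          simp only [hcnt]
      _ = (L.map (fun c => (t.count c : Int))).sum
            + (L.map (fun c => if x = c then (1 : Int) else 0)).sum := by
          rw [← List.sum_map_add]
      _ = ((x :: t).countP (fun ch => L.contains ch) : Int) := by
          rw [ih, sum_indicator_nodup L x hL]
          by_cases hx : x ∈ L
          · simp [hx]
          · simp [hx]

-- A-side loop as countP
theorem a_loop_eq_countP (L s : List Char) (hL : L.Nodup) :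
    L.foldl (fun acc c => acc + (PySem.Chars.count s [c] : Int)) 0 =
      (s.countP (fun ch => L.contains ch) : Int) := by
  simp only [chars_count_singleton]
  rw [PySem.List.foldl_add, sum_counts_eq_countP L hL s, zero_add]

-- B-side pair fold computes the two countPs
theorem b_fold_eq (s : List Char) (a b : Int) :
    s.foldl
      (fun (acc : Int × Int) ch =>
        (if oddSet.contains ch then acc.1 + 1 else acc.1,
         if lowSet.contains ch then acc.2 + 1 else acc.2)) (a, b) =
      (a + (s.countP (fun ch => oddSet.contains ch) : Int),
       b + (s.countP (fun ch => lowSet.contains ch) : Int)) := by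
  induction s generalizing a b with
  | nil => simp
  | cons x t ih =>
    simp only [List.foldl_cons, ih, List.countP_cons]
    by_cases h1 : x ∈ oddSet <;> by_cases h2 : x ∈ lowSet <;>
      simp [h1, h2, Prod.ext_iff] <;> omega

theorem odds_eval :
    (PySem.List.slice? alphChars (some 1) none 2).getD [] = "13579BDFHJLN".toList := by
  decide

theorem oddSet_eval : oddSet = "13579BDFHJLN".toList := by decide
theorem lowSet_eval : lowSet = "012345".toList := by decide

-- ===== VERDICT (by name: the statement is the Claim_ definition above) =====
theorem check_spec : Claim_equal_check := by
  intro num _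
  unfold Spec_check check check_alt
  simp only [odds_eval, b_fold_eq]
  rw [a_loop_eq_countP _ _ (by decide), a_loop_eq_countP _ _ (by decide)]
  rw [oddSet_eval, lowSet_eval]
  simp
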